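-- pv_equiv track=rewrite | github.com/evgenius1424/remove-anagrams-and-subanagrams | solutions/python/solution_01_brute_force.py | remove_anagrams_and_sub_anagrams
-- ===== SOURCE A (Python) =====
-- ALPHABET = 26
--
-- def remove_anagrams_and_sub_anagrams(words: list[str]) -> list[str]:
--     if not words:
--         return []
--
--     groups = {}
--     for word in words:
--         key = tuple(freq_vector(word))
--         groups.setdefault(key, []).append(word)
--
--     unique_groups = {k: v[0] for k, v in groups.items() if len(v) == 1}
--
--     if not unique_groups:
--         return []
--
--     to_remove = set()
--     keys = list(unique_groups.keys())
--
--     for i, vec_i in enumerate(keys):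
--         for j, vec_j in enumerate(keys):
--             if i == j:
--                 continue
--             if is_sub_anagram(vec_i, vec_j):
--                 to_remove.add(vec_i)
--                 break
--
--     return [unique_groups[k] for k in keys if k not in to_remove]
--
-- def freq_vector(word: str) -> list[int]:
--     f = [0] * ALPHABET
--     for c in word:
--         if 'a' <= c <= 'z':
--             f[ord(c) - ord('a')] += 1
--     return f
--
-- def is_sub_anagram(smaller: tuple[int, ...], larger: tuple[int, ...]) -> bool:
--     if sum(smaller) >= sum(larger):
--         return False
--
--     for i in range(ALPHABET):
--         if smaller[i] > larger[i]:
--             return False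
--     return True
-- ===== SOURCE B (Python) =====
-- def letter_vector(w):
--     # a..z frequency vector of w as a tuple of 26 counts
--     return tuple(sum(1 for c in w if c == chr(97 + k)) for k in range(26))
--
-- def remove_anagrams_and_sub_anagrams(words: list[str]) -> list[str]:
--     pairs = [(letter_vector(w), w) for w in words]
--     vecs = [v for v, _ in pairs]
--     # a word survives the dedup stage iff its vector occurs exactly once
--     uniq = [(v, w) for v, w in pairs if vecs.count(v) == 1]
--     # sweep the unique vectors in descending total-letter-count order: every
--     # possible dominator (strictly larger sum, componentwise >=) comes earlier
--     entries = sorted([(i, v) for i, (v, _) in enumerate(uniq)], key=lambda e: -sum(e[1]))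
--     keep, seen = [], []
--     for i, v in entries:
--         if not any(sum(s) > sum(v) and all(x <= y for x, y in zip(v, s)) for s in seen):
--             keep.append(i)
--         seen.append(v)
--     keep.sort()
--     return [uniq[i][1] for i in keep]
-- ===== Notes on version B (the rewrite author's own statement) =====
-- stated objective: alternative
-- what changed: Replaces A's dict-of-groups plus all-pairs O(u^2) dominated-by test over every pair of unique vectors with a count-based uniqueness filter followed by a single descending-total-letter-count sweep that only compares each vector against the already-seen (necessarily not-dominated-by-later) vectors, restoring the original order by sorting the kept indices.
import Mathlib
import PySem

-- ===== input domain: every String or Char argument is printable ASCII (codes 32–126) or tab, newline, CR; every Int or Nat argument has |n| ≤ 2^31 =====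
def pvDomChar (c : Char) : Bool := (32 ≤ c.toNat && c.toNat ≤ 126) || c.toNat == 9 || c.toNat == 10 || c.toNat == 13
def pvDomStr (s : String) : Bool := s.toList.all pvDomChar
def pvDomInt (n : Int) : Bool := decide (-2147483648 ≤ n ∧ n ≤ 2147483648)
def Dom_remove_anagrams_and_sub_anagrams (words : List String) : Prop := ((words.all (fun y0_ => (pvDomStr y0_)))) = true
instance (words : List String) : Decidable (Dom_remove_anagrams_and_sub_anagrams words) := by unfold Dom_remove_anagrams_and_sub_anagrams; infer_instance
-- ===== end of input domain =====

-- B replaces the all-pairs sub-anagram scan over unique vectors by a single sweep in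
-- descending total-letter-count order (alternative decomposition, same asymptotic cost).

-- ===== PORT A =====
def freq_vector (word : String) : List Int :=
  word.toList.foldl (fun f c =>
    if 'a' ≤ c ∧ c ≤ 'z' then
      -- f[ord(c) - ord('a')] += 1 — the index is always in range 0..25
      f.set (c.toNat - 97) (f.getD (c.toNat - 97) 0 + 1)
    else f) (List.replicate 26 0)

def is_sub_anagram (smaller : List Int) (larger : List Int) : Bool :=
  if smaller.sum ≥ larger.sum then false
  else (PySem.List.pyRange 0 26).all
    (fun i => !(PySem.List.pyGetD smaller i 0 > PySem.List.pyGetD larger i 0))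

def remove_anagrams_and_sub_anagrams (words : List String) : List String :=
  if words = [] then []
  else
    let groups : PySem.Dict (List Int) (List String) :=
      words.foldl (fun d word => d.modify (freq_vector word) [] (fun v => v ++ [word]))
        PySem.Dict.empty
    let unique_groups : PySem.Dict (List Int) String :=
      groups.items.foldl (fun d p =>
        if p.2.length = 1 then d.insert p.1 (PySem.List.pyGetD p.2 0 "") else d)
        PySem.Dict.empty
    if unique_groups.size = 0 then []
    else
      let keys := unique_groups.keys
      let to_remove : PySem.Set (List Int) :=
        (PySem.List.enumerate keys).foldl (fun s p =>
          if (PySem.List.enumerate keys).any (fun q => q.1 != p.1 && is_sub_anagram p.2 q.2)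
          then PySem.Set.add s p.2 else s) PySem.Set.empty
      keys.foldl (fun acc k =>
        if to_remove.contains k then acc else acc ++ [unique_groups.getD k ""]) []

-- ===== PORT B =====
def letter_vector (w : String) : List Int :=
  (PySem.List.pyRange 0 26).map (fun k =>
    (w.toList.map (fun c => if c == Char.ofNat (97 + k).toNat then (1 : Int) else 0)).sum)

def remove_anagrams_and_sub_anagrams_alt (words : List String) : List String :=
  let pairs := words.map (fun w => (letter_vector w, w))
  let vecs := pairs.map (fun p => p.1)
  let uniq := pairs.filter (fun p => PySem.List.count vecs p.1 == 1)
  let entries := PySem.List.sorted ((PySem.List.enumerate uniq).map (fun q => (q.1, q.2.1)))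
      (fun e => -(e.2.sum))
  let swept := entries.foldl (fun (st : List Int × List (List Int)) e =>
      (if st.2.any (fun s => decide (s.sum > e.2.sum) &&
            (e.2.zip s).all (fun xy => decide (xy.1 ≤ xy.2)))
       then st.1 else st.1 ++ [e.1],
       st.2 ++ [e.2])) ([], [])
  (PySem.List.sorted swept.1 (fun i => i)).map
    (fun i => (PySem.List.pyGetD uniq i ([], "")).2)

-- ===== PRECONDITION & SPEC =====
def Spec_remove_anagrams_and_sub_anagrams (words : List String) (out : List String) : Prop := out = remove_anagrams_and_sub_anagrams_alt words
instance (words : List String) (out : List String) : Decidable (Spec_remove_anagrams_and_sub_anagrams words out) := by unfold Spec_remove_anagrams_and_sub_anagrams; infer_instance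

-- ===== CLAIM (what is proved, stated in full; the proofs are below) =====
def Claim_equal_remove_anagrams_and_sub_anagrams : Prop := ∀ (words : List String), Dom_remove_anagrams_and_sub_anagrams words → Spec_remove_anagrams_and_sub_anagrams words (remove_anagrams_and_sub_anagrams words)

-- ===== LEMMAS AND PROOFS =====

-- canonical middle form both ports are reduced to
def canPairs (words : List String) : List (List Int × String) :=
  words.map (fun w => (freq_vector w, w))

def canUniq (words : List String) : List (List Int × String) :=
  (canPairs words).filter
    (fun p => PySem.List.count ((canPairs words).map (fun p => p.1)) p.1 == 1)

def canCond (words : List String) (v : List Int) : Bool :=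
  ((canUniq words).map (fun p => p.1)).any (fun u => is_sub_anagram v u)

def canOut (words : List String) : List String :=
  ((canUniq words).filter (fun p => !canCond words p.1)).map (fun p => p.2)

theorem char_le_iff (a b : Char) : a ≤ b ↔ a.toNat ≤ b.toNat := by
  constructor <;> intro h
  · exact h
  · exact h

theorem freq_loop (cs : List Char) (g : ℕ → Int) :
    cs.foldl (fun f c =>
      if 'a' ≤ c ∧ c ≤ 'z' then
        f.set (c.toNat - 97) (f.getD (c.toNat - 97) 0 + 1)
      else f) ((List.range 26).map g) =
    (List.range 26).map (fun k => g k + ((cs.filter (fun c => c.toNat == 97 + k)).length : Int)) := by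
  induction cs generalizing g with
  | nil => simp
  | cons c cs ih =>
    by_cases h : 'a' ≤ c ∧ c ≤ 'z'
    · have hc : 97 ≤ c.toNat ∧ c.toNat ≤ 122 := ⟨(char_le_iff 'a' c).1 h.1, (char_le_iff c 'z').1 h.2⟩
      have hset : ((List.range 26).map g).set (c.toNat - 97)
            ((((List.range 26).map g).getD (c.toNat - 97) 0) + 1) =
          (List.range 26).map (fun k => if k = c.toNat - 97 then g k + 1 else g k) := by
        have hlt : c.toNat - 97 < 26 := by omega
        have hgd : (((List.range 26).map g).getD (c.toNat - 97) 0) = g (c.toNat - 97) := by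
          simp [List.getD, hlt]
        rw [hgd]
        apply List.ext_getElem
        · simp
        · intro j hj hj'
          simp only [List.getElem_set, List.getElem_map, List.getElem_range]
          by_cases hji : j = c.toNat - 97
          · simp [hji]
          · rw [if_neg (fun hh => hji hh.symm), if_neg hji]
      simp only [List.foldl_cons, if_pos h, hset, ih]
      apply List.map_congr_left
      intro k hk
      simp only [List.mem_range] at hk
      by_cases hk2 : c.toNat = 97 + k
      · rw [if_pos (by omega), List.filter_cons_of_pos (by simp [hk2])]
        simp only [List.length_cons]
        push_cast; ring
      · rw [if_neg (by omega), List.filter_cons_of_neg (by simp [hk2])]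
    · have hc : c.toNat < 97 ∨ 122 < c.toNat := by
        by_contra hcon
        push_neg at hcon
        exact h ⟨(char_le_iff 'a' c).2 (by rw [show 'a'.toNat = 97 from rfl]; omega),
                 (char_le_iff c 'z').2 (by rw [show 'z'.toNat = 122 from rfl]; omega)⟩
      simp only [List.foldl_cons, if_neg h, ih]
      apply List.map_congr_left
      intro k hk
      simp only [List.mem_range] at hk
      rw [List.filter_cons_of_neg (by simp; omega)]

theorem freq_vector_eq_map (w : String) :
    freq_vector w = (List.range 26).map
      (fun k => ((w.toList.filter (fun c => c.toNat == 97 + k)).length : Int)) := by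
  have h0 : (List.replicate 26 (0:Int)) = (List.range 26).map (fun _ => 0) := by
    simp [List.map_const']
  rw [freq_vector, h0, freq_loop]
  simp

theorem letter_vector_eq (w : String) : letter_vector w = freq_vector w := by
  rw [freq_vector_eq_map, letter_vector]
  have h26 : (26 : Int) = ((26 : Nat) : Int) := rfl
  rw [h26, PySem.List.pyRange_zero_natCast, List.map_map]
  apply List.map_congr_left
  intro k hk
  simp only [List.mem_range] at hk
  simp only [Function.comp]
  have harg : ((97 : Int) + (k : Int)).toNat = 97 + k := by omega
  rw [harg, PySem.List.sum_map_ite_one_zero]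
  congr 1
  rw [List.countP_eq_length_filter]
  congr 1
  have hv : (Char.ofNat (97 + k)).toNat = 97 + k := by interval_cases k <;> decide
  apply List.filter_congr
  intro c _
  cases hceq : (c == Char.ofNat (97 + k)) <;> cases hn : (c.toNat == 97 + k) <;> simp_all
  exact hceq (Char.ext (UInt32.toNat_inj.mp
    (show c.toNat = (Char.ofNat (97 + k)).toNat by omega)))

theorem length_freq_vector (w : String) : (freq_vector w).length = 26 := by
  rw [freq_vector_eq_map]; simp

theorem is_sub_anagram_self (v : List Int) : is_sub_anagram v v = false := by
  simp [is_sub_anagram]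

theorem is_sub_anagram_eq (v u : List Int) (hv : v.length = 26) (hu : u.length = 26) :
    is_sub_anagram v u =
      (decide (u.sum > v.sum) && (v.zip u).all (fun xy => decide (xy.1 ≤ xy.2))) := by
  rw [is_sub_anagram]
  by_cases hs : v.sum ≥ u.sum
  · rw [if_pos hs]
    have hd : decide (u.sum > v.sum) = false := by
      simp only [decide_eq_false_iff_not]; omega
    rw [hd, Bool.false_and]
  · rw [if_neg hs]
    have hd : decide (u.sum > v.sum) = true := by simp at hs ⊢; omega
    rw [hd, Bool.true_and, Bool.eq_iff_iff]
    have h26 : (26 : Int) = ((26 : Nat) : Int) := rfl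
    rw [h26, PySem.List.pyRange_zero_natCast, List.all_map]
    simp only [Function.comp_def, PySem.List.pyGetD_natCast]
    simp only [List.all_eq_true, List.mem_range, Bool.not_eq_eq_eq_not, Bool.not_true,
      decide_eq_false_iff_not, not_lt, decide_eq_true_eq]
    constructor
    · intro hall xy hxy
      rcases List.mem_iff_getElem.mp hxy with ⟨i, hi, hxyeq⟩
      have hi26 : i < 26 := by
        rw [List.length_zip, hv, hu] at hi; omega
      have := hall i hi26
      rw [List.getD_eq_getElem _ _ (by omega), List.getD_eq_getElem _ _ (by omega)] at this
      rw [← hxyeq, List.getElem_zip]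
      exact this
    · intro hall i hi
      rw [List.getD_eq_getElem _ _ (by omega), List.getD_eq_getElem _ _ (by omega)]
      have hz : i < (v.zip u).length := by rw [List.length_zip, hv, hu]; omega
      have := hall _ (List.mem_iff_getElem.mpr ⟨i, hz, rfl⟩)
      rwa [List.getElem_zip] at this

theorem ofList_filter_count {α : Type} [BEq α] [LawfulBEq α] (vs : List α) (p : α → Bool)
    (h : ∀ v, p v = true → vs.count v ≤ 1) :
    (PySem.Set.ofList vs).filter p = vs.filter p := by
  induction vs with
  | nil => simp [PySem.Set.ofList_nil]
  | cons x t ih =>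
    have ht : ∀ v, p v = true → t.count v ≤ 1 := by
      intro v hv
      have hc := h v hv
      rw [List.count_cons] at hc
      omega
    rw [PySem.Set.ofList_cons, PySem.Set.discard.eq_1, List.filter_cons, List.filter_cons]
    by_cases hx : p x = true
    · have hxt : x ∉ t := by
        have hc := h x hx
        rw [List.count_cons_self] at hc
        intro hmem
        have := List.count_pos_iff.mpr hmem
        omega
      rw [if_pos hx, if_pos hx, List.filter_filter]
      congr 1
      rw [← ih ht]
      apply List.filter_congr
      intro y hy
      have hyx : ¬ (y = x) := by
        intro he; subst he
        exact hxt ((PySem.Set.mem_ofList t y).mp hy)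
      simp [hyx]
    · rw [if_neg hx, if_neg hx, List.filter_filter]
      rw [← ih ht]
      apply List.filter_congr
      intro y hy
      by_cases hpy : p y = true
      · have hyx : ¬ (y = x) := by
          intro he; subst he; exact hx hpy
        simp [hyx, hpy]
      · simp [hpy]

-- A-side decomposition
def vsOf (words : List String) : List (List Int) := (canPairs words).map (fun p => p.1)

def dictG (words : List String) : PySem.Dict (List Int) (List String) :=
  (canPairs words).foldl (fun d p => d.modify p.1 [] (fun v => v ++ [p.2])) PySem.Dict.empty

def dictU (words : List String) : PySem.Dict (List Int) String :=
  (dictG words).items.foldl (fun d p =>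
    if p.2.length = 1 then d.insert p.1 (PySem.List.pyGetD p.2 0 "") else d) PySem.Dict.empty

theorem A_fold_G (words : List String) :
    words.foldl (fun d word => d.modify (freq_vector word) [] (fun v => v ++ [word]))
      PySem.Dict.empty = dictG words := by
  rw [dictG, canPairs, List.foldl_map]

theorem dictG_keys (words : List String) :
    (dictG words).keys = PySem.Set.ofList (vsOf words) := by
  have h := PySem.Dict.keys_foldl_modify_key (canPairs words)
    (fun p : List Int × String => p.1) ([] : List String)
    (fun _ p => fun v => v ++ [p.2]) PySem.Dict.empty
  rw [PySem.Dict.keys_empty, PySem.Set.update_nil_left] at h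
  exact h

theorem dictG_nodup (words : List String) : (dictG words).keys.Nodup := by
  rw [dictG_keys]
  exact PySem.Set.nodup_ofList _

theorem dictG_getD (words : List String) (c : List Int) :
    (dictG words).getD c [] = ((canPairs words).filter (fun p => p.1 == c)).map (fun p => p.2) := by
  have h := PySem.Dict.getD_foldl_modify_append (canPairs words) PySem.Dict.empty c
  rw [PySem.Dict.getD_empty] at h
  exact h.trans (by rw [List.nil_append])

theorem dictG_items (words : List String) :
    (dictG words).items = (PySem.Set.ofList (vsOf words)).map
      (fun k => (k, ((canPairs words).filter (fun p => p.1 == k)).map (fun p => p.2))) := by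
  rw [PySem.Dict.items_eq_map_keys (dictG words) (dictG_nodup words) []]
  rw [dictG_keys]
  apply List.map_congr_left
  intro k _
  rw [dictG_getD]

theorem count_vs (words : List String) (k : List Int) :
    (vsOf words).count k = ((canPairs words).filter (fun p => p.1 == k)).length := by
  rw [vsOf, List.count_eq_countP, List.countP_map, List.countP_eq_length_filter]
  all_goals rfl

theorem uniq_mem_count (words : List String) (p : List Int × String) (hp : p ∈ canUniq words) :
    p ∈ canPairs words ∧ (vsOf words).count p.1 = 1 := by
  rw [canUniq, List.mem_filter] at hp
  refine ⟨hp.1, ?_⟩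
  have h2 := hp.2
  have hr : PySem.List.count ((canPairs words).map (fun p => p.1)) p.1 = (vsOf words).count p.1 := rfl
  rw [hr, beq_iff_eq] at h2
  exact h2

theorem uniq_singleton (words : List String) (p : List Int × String) (hp : p ∈ canUniq words) :
    (canPairs words).filter (fun q => q.1 == p.1) = [p] := by
  rcases uniq_mem_count words p hp with ⟨hmem, hcnt⟩
  rw [count_vs] at hcnt
  rcases List.length_eq_one_iff.mp hcnt with ⟨a, ha⟩
  have hpin : p ∈ (canPairs words).filter (fun q => q.1 == p.1) :=
    List.mem_filter.mpr ⟨hmem, by simp⟩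
  rw [ha] at hpin ⊢
  simp at hpin
  rw [hpin]

theorem nat_beq_one (n : Nat) : (n == 1) = decide (n = 1) := by
  cases h : (n == 1) <;> simp_all

theorem vs_filter_nodup (words : List String) :
    ((vsOf words).filter (fun k => PySem.List.count (vsOf words) k == 1)).Nodup := by
  rw [List.nodup_iff_count_le_one]
  intro a
  by_cases ha : (PySem.List.count (vsOf words) a == 1) = true
  · rw [List.count_filter (p := fun k => PySem.List.count (vsOf words) k == 1) ha]
    have hr : PySem.List.count (vsOf words) a = (vsOf words).count a := rfl
    rw [hr, beq_iff_eq] at ha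
    have hr2 : List.count a (vsOf words) = (vsOf words).count a := rfl
    omega
  · have hnm : a ∉ (vsOf words).filter (fun k => PySem.List.count (vsOf words) k == 1) := by
      intro hmem
      exact ha (List.mem_filter.mp hmem).2
    rw [List.count_eq_zero_of_not_mem hnm]
    omega

theorem canUniq_map_fst (words : List String) :
    (canUniq words).map (fun p => p.1) =
      (vsOf words).filter (fun k => PySem.List.count (vsOf words) k == 1) := by
  rw [canUniq]
  have h := List.filter_map (f := fun p : List Int × String => p.1)
    (p := fun k => PySem.List.count (vsOf words) k == 1) (l := canPairs words)
  exact h.symm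

theorem pyGetD_singleton {α : Type} (a d : α) : PySem.List.pyGetD [a] 0 d = a := rfl

theorem canUniq_eq_filter_map (words : List String) :
    ((vsOf words).filter (fun k => PySem.List.count (vsOf words) k == 1)).map
      (fun k => (k, PySem.List.pyGetD (((canPairs words).filter
        (fun p => p.1 == k)).map (fun p => p.2)) 0 "")) = canUniq words := by
  rw [← canUniq_map_fst, List.map_map]
  conv_rhs => rw [← List.map_id (canUniq words)]
  apply List.map_congr_left
  intro p hp
  simp only [Function.comp_apply, id]
  rw [uniq_singleton words p hp]
  simp only [List.map_cons, List.map_nil]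
  rw [pyGetD_singleton]

theorem dictU_items (words : List String) : (dictU words).items = canUniq words := by
  rw [dictU, PySem.List.foldl_ite_eq_foldl_filter
    (p := fun (p : List Int × List String) => p.2.length = 1)]
  rw [dictG_items, List.filter_map, List.foldl_map]
  have hpred : (List.filter ((fun (x : List Int × List String) => decide (x.2.length = 1)) ∘
        (fun k => (k, ((canPairs words).filter (fun p => p.1 == k)).map (fun p => p.2))))
        (PySem.Set.ofList (vsOf words))) =
      (PySem.Set.ofList (vsOf words)).filter (fun k => PySem.List.count (vsOf words) k == 1) := by
    apply List.filter_congr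
    intro k _
    simp only [Function.comp_apply, List.length_map]
    rw [← List.countP_eq_length_filter]
    have hc : List.countP (fun p => p.1 == k) (canPairs words) = PySem.List.count (vsOf words) k := by
      rw [show PySem.List.count (vsOf words) k = (vsOf words).count k from rfl]
      rw [count_vs, List.countP_eq_length_filter]
    rw [hc, nat_beq_one]
  rw [hpred]
  rw [ofList_filter_count (vsOf words) _ (by
    intro v hv
    rw [show PySem.List.count (vsOf words) v = (vsOf words).count v from rfl, beq_iff_eq] at hv
    omega)]
  have hfresh := PySem.Dict.items_foldl_insert_fresh
    ((vsOf words).filter (fun k => PySem.List.count (vsOf words) k == 1))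
    (fun k => k)
    (fun k => PySem.List.pyGetD (((canPairs words).filter
        (fun p => p.1 == k)).map (fun p => p.2)) 0 "")
    PySem.Dict.empty
    (by intro a _; exact PySem.Dict.contains_empty a)
    (by simpa using vs_filter_nodup words)
  refine hfresh.trans ?_
  show [] ++ _ = canUniq words
  rw [List.nil_append]
  exact canUniq_eq_filter_map words

theorem dictU_keys (words : List String) :
    (dictU words).keys = (canUniq words).map (fun p => p.1) := by
  have h : (dictU words).keys = (dictU words).items.map (fun p => p.1) := rfl
  rw [h, dictU_items]

theorem dictU_keys_nodup (words : List String) : (dictU words).keys.Nodup := by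
  rw [dictU_keys, canUniq_map_fst]
  exact vs_filter_nodup words

theorem canCond_eq_keys_any (words : List String) (v : List Int) :
    canCond words v = ((dictU words).keys).any (fun u => is_sub_anagram v u) := by
  rw [canCond, dictU_keys]

theorem is_sub_any_cond (words : List String) (p : Int × List Int)
    (hp : p ∈ PySem.List.enumerate ((dictU words).keys) 0) :
    ((PySem.List.enumerate ((dictU words).keys) 0).any
        (fun q => q.1 != p.1 && is_sub_anagram p.2 q.2)) = canCond words p.2 := by
  rw [canCond_eq_keys_any, Bool.eq_iff_iff, List.any_eq_true, List.any_eq_true]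
  rcases (PySem.List.mem_enumerate_iff _ _ _).mp hp with ⟨i, hi, hpe⟩
  constructor
  · rintro ⟨q, hq, hb⟩
    rw [Bool.and_eq_true] at hb
    rcases (PySem.List.mem_enumerate_iff _ _ _).mp hq with ⟨j, hj, hqe⟩
    refine ⟨((dictU words).keys)[j], List.getElem_mem hj, ?_⟩
    have : q.2 = ((dictU words).keys)[j] := by rw [hqe]
    rw [← this]
    exact hb.2
  · rintro ⟨u, hu, hb⟩
    rcases List.mem_iff_getElem.mp hu with ⟨j, hj, hue⟩
    refine ⟨((0 : Int) + (j : Int), ((dictU words).keys)[j]),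
      (PySem.List.mem_enumerate_iff _ _ _).mpr ⟨j, hj, rfl⟩, ?_⟩
    rw [Bool.and_eq_true]
    constructor
    · simp only [bne_iff_ne, ne_eq]
      intro he
      have hij : j = i := by
        have h1 : ((0 : Int) + (j : Int)) = p.1 := he
        rw [hpe] at h1
        simp at h1
        omega
      subst hij
      have hp2 : p.2 = ((dictU words).keys)[j] := by rw [hpe]
      rw [hp2, hue, is_sub_anagram_self] at hb
      exact Bool.false_ne_true hb
    · rw [hue]
      exact hb

theorem to_remove_eq (words : List String) :
    (PySem.List.enumerate ((dictU words).keys) 0).foldl (fun s p =>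
        if (PySem.List.enumerate ((dictU words).keys) 0).any
            (fun q => q.1 != p.1 && is_sub_anagram p.2 q.2)
        then PySem.Set.add s p.2 else s) PySem.Set.empty =
    PySem.Set.ofList (((PySem.List.enumerate ((dictU words).keys) 0).filter
        (fun p => canCond words p.2)).map (fun p => p.2)) := by
  have h1 := PySem.List.foldl_congr_mem
    (l := PySem.List.enumerate ((dictU words).keys) 0)
    (init := (PySem.Set.empty : PySem.Set (List Int)))
    (f := fun s p =>
        if (PySem.List.enumerate ((dictU words).keys) 0).any
            (fun q => q.1 != p.1 && is_sub_anagram p.2 q.2)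
        then PySem.Set.add s p.2 else s)
    (g := fun s p => if canCond words p.2 then PySem.Set.add s p.2 else s)
    (by intro acc x hx
        show (if (PySem.List.enumerate ((dictU words).keys) 0).any
            (fun q => q.1 != x.1 && is_sub_anagram x.2 q.2)
          then PySem.Set.add acc x.2 else acc) =
          (if canCond words x.2 then PySem.Set.add acc x.2 else acc)
        rw [is_sub_any_cond words x hx])
  rw [h1]
  rw [PySem.List.foldl_if_eq_foldl_filter (p := fun p : Int × List Int => canCond words p.2)
    (f := fun s p => PySem.Set.add s p.2)]
  rw [← List.foldl_map (f := fun p : Int × List Int => p.2) (g := PySem.Set.add)]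
  rw [PySem.Set.ofList_eq_foldl]
  rfl

theorem to_remove_contains (words : List String) (k : List Int)
    (hk : k ∈ (dictU words).keys) :
    PySem.Set.contains (PySem.Set.ofList (((PySem.List.enumerate ((dictU words).keys) 0).filter
        (fun p => canCond words p.2)).map (fun p => p.2))) k = canCond words k := by
  cases hc : canCond words k
  · cases hS : PySem.Set.contains (PySem.Set.ofList (((PySem.List.enumerate ((dictU words).keys) 0).filter
        (fun p => canCond words p.2)).map (fun p => p.2))) k
    · rfl
    · exfalso
      have hmem := (PySem.Set.contains_iff _ _).mp hS
      rw [PySem.Set.mem_ofList] at hmem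
      rcases List.mem_map.mp hmem with ⟨q, hqf, hqe⟩
      have := (List.mem_filter.mp hqf).2
      rw [hqe, hc] at this
      exact Bool.false_ne_true this
  · apply (PySem.Set.contains_iff _ _).mpr
    rw [PySem.Set.mem_ofList]
    rcases List.mem_iff_getElem.mp hk with ⟨i, hi, hie⟩
    apply List.mem_map.mpr
    refine ⟨((0 : Int) + (i : Int), ((dictU words).keys)[i]), ?_, hie⟩
    apply List.mem_filter.mpr
    refine ⟨(PySem.List.mem_enumerate_iff _ _ _).mpr ⟨i, hi, rfl⟩, ?_⟩
    rw [hie, hc]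

theorem A_final_fold (words : List String) (S : PySem.Set (List Int))
    (hS : ∀ k ∈ (dictU words).keys, PySem.Set.contains S k = canCond words k) :
    ((dictU words).keys).foldl (fun acc k =>
        if PySem.Set.contains S k then acc else acc ++ [(dictU words).getD k ""]) [] =
    canOut words := by
  have h1 := PySem.List.foldl_congr_mem
    (l := (dictU words).keys) (init := ([] : List String))
    (f := fun acc k => if PySem.Set.contains S k then acc else acc ++ [(dictU words).getD k ""])
    (g := fun acc k => if (!canCond words k) then acc ++ [(dictU words).getD k ""] else acc)
    (by intro acc k hk
        show (if PySem.Set.contains S k then acc else acc ++ [(dictU words).getD k ""]) =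
          (if (!canCond words k) then acc ++ [(dictU words).getD k ""] else acc)
        rw [hS k hk]
        cases hc : canCond words k <;> simp [hc])
  rw [h1]
  rw [PySem.List.foldl_append_if (p := fun k => !canCond words k)
    (f := fun k => (dictU words).getD k "")]
  rw [List.nil_append, dictU_keys, List.filter_map, List.map_map]
  rw [canOut]
  have hfeq : (canUniq words).filter ((fun k => !canCond words k) ∘ (fun p : List Int × String => p.1)) =
      (canUniq words).filter (fun p => !canCond words p.1) := rfl
  rw [hfeq]
  apply List.map_congr_left
  intro p hp
  have hpU : p ∈ canUniq words := (List.mem_filter.mp hp).1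
  have hitems : (p.1, p.2) ∈ (dictU words).items := by
    rw [dictU_items]
    simpa using hpU
  exact PySem.Dict.getD_of_mem_items _ hitems (dictU_keys_nodup words) ""

theorem A_eq_canOut (words : List String) :
    remove_anagrams_and_sub_anagrams words = canOut words := by
  by_cases hw : words = []
  · subst hw
    rfl
  rw [remove_anagrams_and_sub_anagrams, if_neg hw]
  simp only []
  have hG : words.foldl (fun d word => d.modify (freq_vector word) [] (fun v => v ++ [word]))
      PySem.Dict.empty = dictG words := A_fold_G words
  rw [hG]
  have hU : (dictG words).items.foldl (fun d p =>
      if p.2.length = 1 then d.insert p.1 (PySem.List.pyGetD p.2 0 "") else d)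
      PySem.Dict.empty = dictU words := rfl
  rw [hU]
  have hsz : (dictU words).size = (canUniq words).length := by
    have h : (dictU words).size = (dictU words).items.length := rfl
    rw [h, dictU_items]
  by_cases hu : canUniq words = []
  · rw [if_pos (by rw [hsz, hu]; rfl)]
    rw [canOut, hu]
    rfl
  · rw [if_neg (by
      rw [hsz]
      intro hlen
      exact hu (List.length_eq_zero_iff.mp hlen))]
    rw [to_remove_eq]
    exact A_final_fold words _ (to_remove_contains words)

-- B-side decomposition
theorem dom_false_of_le (e b : Int × List Int) (h : -(e.2.sum) ≤ -(b.2.sum)) :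
    (decide (b.2.sum > e.2.sum) &&
      (e.2.zip b.2).all (fun xy => decide (xy.1 ≤ xy.2))) = false := by
  have hd : decide (b.2.sum > e.2.sum) = false := by
    simp only [decide_eq_false_iff_not]
    omega
  rw [hd, Bool.false_and]

theorem sweep_fold (E : List (Int × List Int))
    (hp : List.Pairwise (fun a b => -(a.2.sum) ≤ -(b.2.sum)) E) :
    ∀ (rest pre : List (Int × List Int)) (acc : List Int), pre ++ rest = E →
    List.foldl (fun (st : List Int × List (List Int)) e =>
        (if st.2.any (fun s => decide (s.sum > e.2.sum) &&
             (e.2.zip s).all (fun xy => decide (xy.1 ≤ xy.2))) then st.1 else st.1 ++ [e.1],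
         st.2 ++ [e.2])) (acc, pre.map (fun e => e.2)) rest =
    (acc ++ (rest.filter (fun e => !((E.map (fun x => x.2)).any (fun s => decide (s.sum > e.2.sum) &&
             (e.2.zip s).all (fun xy => decide (xy.1 ≤ xy.2)))))).map (fun e => e.1),
     E.map (fun e => e.2)) := by
  intro rest
  induction rest with
  | nil =>
    intro pre acc hpre
    rw [List.append_nil] at hpre
    subst hpre
    simp
  | cons e rest ih =>
    intro pre acc hpre
    have hrel : ∀ b ∈ rest, -(e.2.sum) ≤ -(b.2.sum) := by
      have hsub : (e :: rest).Sublist E := by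
        rw [← hpre]
        exact List.sublist_append_right pre (e :: rest)
      exact (List.pairwise_cons.mp (hp.sublist hsub)).1
    have hcond : ((pre.map (fun e => e.2)).any (fun s => decide (s.sum > e.2.sum) &&
        (e.2.zip s).all (fun xy => decide (xy.1 ≤ xy.2)))) =
        ((E.map (fun x => x.2)).any (fun s => decide (s.sum > e.2.sum) &&
        (e.2.zip s).all (fun xy => decide (xy.1 ≤ xy.2)))) := by
      conv_rhs => rw [← hpre]
      rw [List.map_append, List.any_append, List.map_cons, List.any_cons]
      have h1 : (decide (e.2.sum > e.2.sum) &&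
          ((e.2.zip e.2).all (fun xy => decide (xy.1 ≤ xy.2)))) = false :=
        dom_false_of_le e e (le_refl _)
      have h2 : ((rest.map (fun x => x.2)).any (fun s => decide (s.sum > e.2.sum) &&
          ((e.2.zip s).all (fun xy => decide (xy.1 ≤ xy.2))))) = false := by
        rw [List.any_eq_false]
        intro s hs
        rcases List.mem_map.mp hs with ⟨b, hb, hbe⟩
        rw [← hbe]
        rw [dom_false_of_le e b (hrel b hb)]
        simp
      rw [h1, h2]
      simp
    rw [List.foldl_cons]
    dsimp only
    rw [hcond, List.filter_cons]
    have hpre' : (pre ++ [e]) ++ rest = E := by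
      rw [List.append_assoc, List.singleton_append]
      exact hpre
    have hmap' : (pre.map (fun e => e.2)) ++ [e.2] = (pre ++ [e]).map (fun e => e.2) := by
      rw [List.map_append]
      rfl
    cases hc : ((E.map (fun x => x.2)).any (fun s => decide (s.sum > e.2.sum) &&
        (e.2.zip s).all (fun xy => decide (xy.1 ≤ xy.2))))
    · rw [if_neg (by simp), if_pos (by rfl)]
      rw [hmap']
      rw [ih (pre ++ [e]) (acc ++ [e.1]) hpre']
      simp
    · rw [if_pos rfl, if_neg (by simp)]
      rw [hmap']
      rw [ih (pre ++ [e]) acc hpre']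

theorem ks_mem_length (words : List String) (v : List Int)
    (hv : v ∈ (canUniq words).map (fun p => p.1)) : v.length = 26 := by
  rcases List.mem_map.mp hv with ⟨p, hp, hpe⟩
  have hmem : p ∈ canPairs words := (List.mem_filter.mp hp).1
  rcases List.mem_map.mp hmem with ⟨w, _, hwe⟩
  rw [← hpe, ← hwe]
  exact length_freq_vector w

theorem cond_eq_canCond (words : List String) (v : List Int) (hv26 : v.length = 26) :
    ((canUniq words).map (fun p => p.1)).any (fun s => decide (s.sum > v.sum) &&
      (v.zip s).all (fun xy => decide (xy.1 ≤ xy.2))) = canCond words v := by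
  rw [canCond]
  apply (PySem.List.any_congr_mem ?_).symm
  intro u hu
  exact is_sub_anagram_eq v u hv26 (ks_mem_length words u hu)

theorem B_eq_canOut (words : List String) :
    remove_anagrams_and_sub_anagrams_alt words = canOut words := by
  rw [remove_anagrams_and_sub_anagrams_alt]
  have hlv : words.map (fun w => (letter_vector w, w)) = canPairs words := by
    rw [canPairs]
    apply List.map_congr_left
    intro w _
    rw [letter_vector_eq]
  rw [hlv]
  have hcanu : (List.filter (fun p => PySem.List.count (List.map
      (fun p => p.1) (canPairs words)) p.1 == 1) (canPairs words)) = canUniq words := rfl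
  rw [hcanu]
  -- name the pieces
  have hpairwise := PySem.List.sorted_pairwise
    ((PySem.List.enumerate (canUniq words) 0).map (fun q => (q.1, q.2.1)))
    (fun e : Int × List Int => -(e.2.sum))
  set E := PySem.List.sorted ((PySem.List.enumerate (canUniq words) 0).map (fun q => (q.1, q.2.1)))
    (fun e : Int × List Int => -(e.2.sum)) with hE
  have hsweep := sweep_fold E hpairwise E [] [] (by rw [List.nil_append])
  rw [List.map_nil] at hsweep
  rw [hsweep]
  -- the kept index list
  have hEsnd : (E.map (fun x => x.2)).Perm ((canUniq words).map (fun p => p.1)) := by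
    have h1 : E.Perm ((PySem.List.enumerate (canUniq words) 0).map (fun q => (q.1, q.2.1))) :=
      PySem.List.sorted_perm _ _ _
    have h2 := h1.map (fun x : Int × List Int => x.2)
    rw [List.map_map] at h2
    have h3 : ((PySem.List.enumerate (canUniq words) 0).map
        ((fun x : Int × List Int => x.2) ∘ (fun q : Int × (List Int × String) => (q.1, q.2.1)))) =
        (canUniq words).map (fun p => p.1) := by
      have h4 : ((PySem.List.enumerate (canUniq words) 0).map
          ((fun x : Int × List Int => x.2) ∘ (fun q : Int × (List Int × String) => (q.1, q.2.1)))) =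
          ((PySem.List.enumerate (canUniq words) 0).map
            (fun q : Int × (List Int × String) => q.2)).map (fun p : List Int × String => p.1) := by
        rw [List.map_map]
        rfl
      rw [h4, PySem.List.map_snd_enumerate]
    rw [h3] at h2
    exact h2
  have hfilter : E.filter (fun e => !((E.map (fun x => x.2)).any (fun s => decide (s.sum > e.2.sum) &&
        (e.2.zip s).all (fun xy => decide (xy.1 ≤ xy.2))))) =
      E.filter (fun e => !canCond words e.2) := by
    apply List.filter_congr
    intro e he
    have he2 : e.2 ∈ E.map (fun x => x.2) := List.mem_map.mpr ⟨e, he, rfl⟩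
    have he2' : e.2 ∈ (canUniq words).map (fun p => p.1) := hEsnd.mem_iff.mp he2
    rw [hEsnd.any_eq, cond_eq_canCond words e.2 (ks_mem_length words e.2 he2')]
  rw [hfilter]
  -- sort the kept indices back into enumerate order
  have hsort : PySem.List.sorted ([] ++ (E.filter (fun e => !canCond words e.2)).map (fun e => e.1))
      (fun i => i) =
      ((PySem.List.enumerate (canUniq words) 0).filter
        (fun q => !canCond words q.2.1)).map (fun q => q.1) := by
    rw [List.nil_append]
    apply PySem.List.sorted_eq_of_perm_of_pairwise_lt
    · -- permutation
      have h1 : E.Perm ((PySem.List.enumerate (canUniq words) 0).map (fun q => (q.1, q.2.1))) :=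
        PySem.List.sorted_perm _ _ _
      have h2 := (h1.filter (fun e => !canCond words e.2)).map (fun e : Int × List Int => e.1)
      have h3 : (((PySem.List.enumerate (canUniq words) 0).map
          (fun q => (q.1, q.2.1))).filter (fun e => !canCond words e.2)).map
            (fun e : Int × List Int => e.1) =
          ((PySem.List.enumerate (canUniq words) 0).filter
            (fun q => !canCond words q.2.1)).map (fun q => q.1) := by
        rw [List.filter_map, List.map_map]
        rfl
      rw [h3] at h2
      exact h2.symm
    · -- strictly increasing indices
      have h1 := PySem.List.pairwise_lt_enumerate (canUniq words) 0
      have h2 := h1.sublist (List.filter_sublist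
        (p := fun q : Int × (List Int × String) => !canCond words q.2.1))
      exact List.Pairwise.map (S := fun a b : Int => a < b)
        (fun q : Int × (List Int × String) => q.1) (fun a b hab => hab) h2
  rw [hsort]
  -- evaluate uniq[i] along the enumerate indices
  rw [List.map_map]
  have hfin : ((PySem.List.enumerate (canUniq words) 0).filter
      (fun q => !canCond words q.2.1)).map
        ((fun i => (PySem.List.pyGetD (canUniq words) i ([], "")).2) ∘ (fun q => q.1)) =
      ((PySem.List.enumerate (canUniq words) 0).filter
        (fun q => !canCond words q.2.1)).map (fun q => q.2.2) := by
    apply List.map_congr_left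
    intro q hq
    have hqe := List.mem_filter.mp hq
    rcases (PySem.List.mem_enumerate_iff _ _ _).mp hqe.1 with ⟨j, hj, hqq⟩
    subst hqq
    simp only [Function.comp_apply]
    have hidx : ((0 : Int) + (j : Int)) = ((j : Nat) : Int) := by omega
    rw [hidx, PySem.List.pyGetD_natCast, List.getD_eq_getElem _ _ hj]
  rw [hfin]
  -- collapse enumerate
  have hcollapse : ((PySem.List.enumerate (canUniq words) 0).filter
      (fun q => !canCond words q.2.1)).map (fun q => q.2.2) = canOut words := by
    rw [canOut]
    have h1 : (canUniq words).filter (fun p => !canCond words p.1) =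
        ((PySem.List.enumerate (canUniq words) 0).filter
          (fun q => !canCond words q.2.1)).map (fun q => q.2) := by
      conv_lhs => rw [← PySem.List.map_snd_enumerate (canUniq words) 0]
      rw [List.filter_map]
      rfl
    rw [h1, List.map_map]
    rfl
  rw [hcollapse]

-- ===== VERDICT (by name: the statement is the Claim_ definition above) =====
theorem remove_anagrams_and_sub_anagrams_spec : Claim_equal_remove_anagrams_and_sub_anagrams := by
  intro words _
  unfold Spec_remove_anagrams_and_sub_anagrams
  rw [A_eq_canOut, B_eq_canOut]
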